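-- pv_equiv track=rewrite | github.com/wl4715/ise-python-challenge | Challenge 2/challenge2.py | compute_row_checksum
-- ===== SOURCE A (Python) =====
-- def compute_row_checksum(row):
--     biggest_number = int(row[0]) # first number of the row as reference
--     lowest_number = int(row[0]) # first number of the row as reference
--     for value in row:
--         if int(value) > biggest_number:
--             biggest_number = int(value)
--         if int(value) < lowest_number:
--             lowest_number = int(value)
--
--     row_checksum = biggest_number - lowest_number
--     return row_checksum
-- ===== SOURCE B (Python) =====
-- def compute_row_checksum(row):
--     s = sorted(int(v) for v in row)
--     return s[-1] - s[0]
-- ===== Notes on version B (the rewrite author's own statement) =====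
-- stated objective: idiomatic
-- what changed: Replaces A's fused linear pass with running max/min accumulators (and three int() calls per element) by sorting the parsed values once and subtracting the endpoints s[-1]-s[0].
import Mathlib
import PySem

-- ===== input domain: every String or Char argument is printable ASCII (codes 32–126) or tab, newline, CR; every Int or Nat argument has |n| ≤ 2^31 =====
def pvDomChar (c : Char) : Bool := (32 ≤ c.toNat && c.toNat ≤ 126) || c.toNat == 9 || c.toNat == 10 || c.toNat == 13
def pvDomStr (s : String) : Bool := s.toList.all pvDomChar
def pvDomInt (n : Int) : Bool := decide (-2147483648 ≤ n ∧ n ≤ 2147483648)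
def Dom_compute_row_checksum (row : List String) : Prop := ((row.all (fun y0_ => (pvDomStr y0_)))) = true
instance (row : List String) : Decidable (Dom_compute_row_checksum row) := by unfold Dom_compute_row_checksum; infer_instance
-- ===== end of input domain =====

-- B sorts the parsed values once and subtracts the endpoints instead of A's fused
-- running-max/min pass; equivalence of the returned value is proved on nonempty
-- rows of int-parseable strings (where the Python A returns).


-- int(s); Pre_ guarantees the parse succeeds, so the 0 default is never taken
def pvParse (s : String) : Int := (PySem.Int.ofStr? s).getD 0

-- ===== PORT A =====
def compute_row_checksum (row : List String) : Int :=
  match PySem.List.pyGet? row 0 with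
  | none => 0  -- row[0] raises IndexError in Python; excluded by Pre_
  | some first =>
    let b0 := pvParse first
    let st := row.foldl (fun (p : Int × Int) value =>
      let x := pvParse value
      (if x > p.1 then x else p.1, if x < p.2 then x else p.2)) (b0, b0)
    st.1 - st.2

-- ===== PORT B =====
def compute_row_checksum_alt (row : List String) : Int :=
  let s := PySem.List.sorted (row.map pvParse) (fun x => x) false
  match PySem.List.pyGet? s (-1), PySem.List.pyGet? s 0 with
  | some hi, some lo => hi - lo
  | _, _ => 0  -- s[-1] raises IndexError in Python; excluded by Pre_

-- ===== PRECONDITION & SPEC =====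
-- Pre_ excludes exactly the inputs where the Python A raises: an empty row
-- (IndexError on row[0]) and rows containing a string that is not a Python int
-- literal (ValueError from int()). The grammar below is int()'s: optional
-- surrounding whitespace, an optional sign, then digits with single
-- underscores between digits.
def pvIsSpace (c : Char) : Bool := c == ' ' || c == '\t' || c == '\n' || c == '\r'

-- after a digit: more digits, or a '_' that must be followed by a digit
def pvIntTail : List Char → Bool
  | [] => true
  | c :: cs =>
    if c.isDigit then pvIntTail cs
    else if c == '_' then
      match cs with
      | c2 :: cs2 => c2.isDigit && pvIntTail cs2
      | [] => false
    else false

def pvIntLit (s : String) : Bool :=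
  let t := ((s.toList.dropWhile pvIsSpace).reverse.dropWhile pvIsSpace).reverse
  let t2 := match t with
    | c :: rest => if c == '+' || c == '-' then rest else t
    | [] => t
  match t2 with
  | c :: rest => c.isDigit && pvIntTail rest
  | [] => false

def Pre_compute_row_checksum (row : List String) : Prop :=
  row ≠ [] ∧ ∀ v ∈ row, pvIntLit v = true
instance (row : List String) : Decidable (Pre_compute_row_checksum row) := by
  unfold Pre_compute_row_checksum; infer_instance
def pvWitness_compute_row_checksum : List String := ["3", "1", "2"]

def Spec_compute_row_checksum (row : List String) (out : Int) : Prop := out = compute_row_checksum_alt row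
instance (row : List String) (out : Int) : Decidable (Spec_compute_row_checksum row out) := by unfold Spec_compute_row_checksum; infer_instance

-- ===== CLAIM (what is proved, stated in full; the proofs are below) =====
def Claim_equal_compute_row_checksum : Prop := ∀ (row : List String), Dom_compute_row_checksum row → Pre_compute_row_checksum row → Spec_compute_row_checksum row (compute_row_checksum row)

-- ===== LEMMAS AND PROOFS =====

lemma ite_max (b x : Int) : (if x > b then x else b) = max b x := by
  rcases max_cases b x with ⟨h1, h2⟩ | ⟨h1, h2⟩ <;> split <;> omega

lemma ite_min (l x : Int) : (if x < l then x else l) = min l x := by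
  rcases min_cases l x with ⟨h1, h2⟩ | ⟨h1, h2⟩ <;> split <;> omega

lemma foldl_pair (xs : List Int) (b l : Int) :
    xs.foldl (fun (p : Int × Int) x =>
      (if x > p.1 then x else p.1, if x < p.2 then x else p.2)) (b, l)
    = (xs.foldl max b, xs.foldl min l) := by
  induction xs generalizing b l with
  | nil => rfl
  | cons x xs ih =>
    simp only [List.foldl_cons, ite_max, ite_min] at ih ⊢
    exact ih (max b x) (min l x)

lemma foldl_max_mem (xs : List Int) (b : Int) :
    xs.foldl max b = b ∨ xs.foldl max b ∈ xs := by
  induction xs generalizing b with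
  | nil => left; rfl
  | cons x xs ih =>
    rcases ih (max b x) with h | h
    · rcases max_cases b x with ⟨h1, _⟩ | ⟨h1, _⟩
      · left; rw [List.foldl_cons, h, h1]
      · right; rw [List.foldl_cons, h, h1]; exact List.mem_cons_self
    · right; rw [List.foldl_cons]; exact List.mem_cons_of_mem x h

lemma foldl_min_mem (xs : List Int) (b : Int) :
    xs.foldl min b = b ∨ xs.foldl min b ∈ xs := by
  induction xs generalizing b with
  | nil => left; rfl
  | cons x xs ih =>
    rcases ih (min b x) with h | h
    · rcases min_cases b x with ⟨h1, _⟩ | ⟨h1, _⟩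
      · left; rw [List.foldl_cons, h, h1]
      · right; rw [List.foldl_cons, h, h1]; exact List.mem_cons_self
    · right; rw [List.foldl_cons]; exact List.mem_cons_of_mem x h

lemma init_le_foldl_max (xs : List Int) (b : Int) : b ≤ xs.foldl max b := by
  induction xs generalizing b with
  | nil => simp
  | cons x xs ih => exact le_trans (le_max_left b x) (ih (max b x))

lemma le_foldl_max (xs : List Int) (b y : Int) (hy : y ∈ xs) : y ≤ xs.foldl max b := by
  induction xs generalizing b with
  | nil => cases hy
  | cons x xs ih =>
    rcases List.mem_cons.mp hy with rfl | h
    · exact le_trans (le_max_right b y) (init_le_foldl_max xs (max b y))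
    · exact ih (max b x) h

lemma foldl_min_le_init (xs : List Int) (b : Int) : xs.foldl min b ≤ b := by
  induction xs generalizing b with
  | nil => simp
  | cons x xs ih => exact le_trans (ih (min b x)) (min_le_left b x)

lemma foldl_min_le (xs : List Int) (b y : Int) (hy : y ∈ xs) : xs.foldl min b ≤ y := by
  induction xs generalizing b with
  | nil => cases hy
  | cons x xs ih =>
    rcases List.mem_cons.mp hy with rfl | h
    · exact le_trans (foldl_min_le_init xs (min b y)) (min_le_right b y)
    · exact ih (min b x) h

lemma pairwise_le_getLast (s : List Int) (h : s ≠ []) (hp : s.Pairwise (· ≤ ·)) :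
    ∀ y ∈ s, y ≤ s.getLast h := by
  induction s with
  | nil => cases h rfl
  | cons a t ih =>
    rcases List.Pairwise.of_cons hp with hpt
    intro y hy
    cases t with
    | nil => simp at hy; simp [hy, List.getLast]
    | cons c u =>
      rw [List.getLast_cons (by simp : (c :: u : List Int) ≠ [])]
      rcases List.mem_cons.mp hy with rfl | h2
      · have hall := (List.pairwise_cons.mp hp).1
        exact le_trans (hall c (by simp))
          ((ih (by simp) hpt) c (by simp))
      · exact ih (by simp) hpt y h2

-- main characterisation: for a nonempty list and an initial value that is a member,
-- foldl max equals the last of the ascending sort, foldl min equals its head.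
lemma foldl_max_eq_sorted_last (xs : List Int) (b : Int) (hb : b ∈ xs)
    (a : Int) (t : List Int)
    (hs : PySem.List.sorted xs (fun x => x) false = a :: t) :
    xs.foldl max b = (a :: t).getLast (by simp) := by
  have hperm : (a :: t).Perm xs := hs ▸ PySem.List.sorted_perm xs (fun x => x) false
  have hpair : (a :: t).Pairwise (fun p q : Int => p ≤ q) := by
    have := PySem.List.sorted_pairwise (xs := xs) (key := fun x : Int => x)
    rw [hs] at this; exact this
  have hlast_mem : (a :: t).getLast (by simp) ∈ xs :=
    hperm.mem_iff.mp (List.getLast_mem _)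
  have hmax_mem : xs.foldl max b ∈ xs := by
    rcases foldl_max_mem xs b with h | h
    · rw [h]; exact hb
    · exact h
  apply le_antisymm
  · exact pairwise_le_getLast (a :: t) (by simp) hpair _ (hperm.mem_iff.mpr hmax_mem)
  · exact le_foldl_max xs b _ hlast_mem

lemma foldl_min_eq_sorted_head (xs : List Int) (b : Int) (hb : b ∈ xs)
    (a : Int) (t : List Int)
    (hs : PySem.List.sorted xs (fun x => x) false = a :: t) :
    xs.foldl min b = a := by
  have hperm : (a :: t).Perm xs := hs ▸ PySem.List.sorted_perm xs (fun x => x) false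
  have ha_mem : a ∈ xs := hperm.mem_iff.mp (by simp)
  have hhead : ∀ y ∈ xs, a ≤ y := fun y hy =>
    PySem.List.key_head_sorted_le (xs := xs) (key := fun x : Int => x) hs y hy
  have hmin_mem : xs.foldl min b ∈ xs := by
    rcases foldl_min_mem xs b with h | h
    · rw [h]; exact hb
    · exact h
  exact le_antisymm (foldl_min_le xs b a ha_mem) (hhead _ hmin_mem)

-- ===== VERDICT (by name: the statement is the Claim_ definition above) =====
theorem compute_row_checksum_spec : Claim_equal_compute_row_checksum := by
  intro row _ hpre
  unfold Spec_compute_row_checksum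
  obtain ⟨hne, _⟩ := hpre
  obtain ⟨f, rest, rfl⟩ := List.exists_cons_of_ne_nil hne
  set xs : List Int := (f :: rest).map pvParse with hxs
  have hxs_ne : xs ≠ [] := by simp [hxs]
  have hs_ne : PySem.List.sorted xs (fun x => x) false ≠ [] := by
    rw [Ne, PySem.List.sorted_eq_nil_iff]; exact hxs_ne
  obtain ⟨a, t, hs⟩ := List.exists_cons_of_ne_nil hs_ne
  have hb : pvParse f ∈ xs := by simp [hxs]
  -- evaluate port A
  have hA : compute_row_checksum (f :: rest)
      = xs.foldl max (pvParse f) - xs.foldl min (pvParse f) := by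
    simp only [compute_row_checksum, PySem.List.pyGet?_zero_cons]
    rw [← List.foldl_map (f := pvParse)
      (g := fun (p : Int × Int) x =>
        (if x > p.1 then x else p.1, if x < p.2 then x else p.2))]
    rw [← hxs, foldl_pair]
  -- evaluate port B
  have hB : compute_row_checksum_alt (f :: rest)
      = (a :: t).getLast (by simp) - a := by
    simp only [compute_row_checksum_alt, ← hxs, hs,
      PySem.List.pyGet?_neg_one, PySem.List.pyGet?_zero_cons]
    rw [List.getLast?_eq_some_getLast (l := a :: t) (by simp)]
  rw [hA, hB,
    foldl_max_eq_sorted_last xs (pvParse f) hb a t hs,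
    foldl_min_eq_sorted_head xs (pvParse f) hb a t hs]
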